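-- pv_equiv track=rewrite | github.com/nikoladze/aoc2021 | day19/solver.py | find_shift
-- ===== SOURCE A (Python) =====
-- def find_shift(coords1, coords2, n_for_success):
--     for x1, y1, z1 in coords1:
--         for x2, y2, z2 in coords2:
--             dx, dy, dz = (x2 - x1), (y2 - y1), (z2 - z1)
--             shifted = [
--                 (x - dx, y - dy, z - dz)
--                 for x, y, z in coords2
--             ]
--             overlapping = [coords for coords in shifted if coords in coords1]
--             if len(overlapping) >= n_for_success:
--                 return (dx, dy, dz), overlapping
-- ===== SOURCE B (Python) =====
-- from collections import Counter
-- from itertools import product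
--
--
-- def find_shift(coords1, coords2, n_for_success):
--     s1 = set(coords1)
--     votes = Counter((x2 - x1, y2 - y1, z2 - z1)
--                     for x2, y2, z2 in coords2
--                     for x1, y1, z1 in s1)
--     d = next(((x2 - x1, y2 - y1, z2 - z1)
--               for (x1, y1, z1), (x2, y2, z2) in product(coords1, coords2)
--               if votes[(x2 - x1, y2 - y1, z2 - z1)] >= n_for_success), None)
--     if d is None:
--         return None
--     dx, dy, dz = d
--     overlapping = [(x - dx, y - dy, z - dz)
--                    for x, y, z in coords2
--                    if (x - dx, y - dy, z - dz) in s1]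
--     return d, overlapping
-- ===== Notes on version B (the rewrite author's own statement) =====
-- stated objective: faster
-- what changed: B precomputes one Counter of candidate shift vectors (coords2 x set(coords1)), picks the winning shift with a single next() over the flat product of pairs (one hash lookup per pair instead of rebuilding and rescanning the shifted list), and builds the overlap list only once for the returned shift.
import Mathlib
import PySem

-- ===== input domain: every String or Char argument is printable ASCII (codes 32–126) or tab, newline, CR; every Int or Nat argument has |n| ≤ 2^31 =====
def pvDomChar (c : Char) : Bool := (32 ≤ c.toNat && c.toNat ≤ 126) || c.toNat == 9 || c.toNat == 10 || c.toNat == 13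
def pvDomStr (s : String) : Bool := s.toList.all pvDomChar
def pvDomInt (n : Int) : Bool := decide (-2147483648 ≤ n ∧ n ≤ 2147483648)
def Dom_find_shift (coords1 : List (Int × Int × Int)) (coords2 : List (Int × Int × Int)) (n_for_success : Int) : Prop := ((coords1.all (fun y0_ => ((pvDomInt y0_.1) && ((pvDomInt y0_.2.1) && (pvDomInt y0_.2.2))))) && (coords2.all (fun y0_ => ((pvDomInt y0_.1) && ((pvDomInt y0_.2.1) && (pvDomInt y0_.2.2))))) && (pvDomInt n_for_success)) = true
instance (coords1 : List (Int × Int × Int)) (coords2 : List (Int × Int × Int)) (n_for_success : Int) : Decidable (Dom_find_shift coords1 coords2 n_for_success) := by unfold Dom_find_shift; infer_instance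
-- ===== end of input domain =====

-- B replaces A's per-candidate rebuild-and-rescan of the shifted list by one precomputed
-- Counter of shift vectors, a single find over the flat list of candidate shifts, and one
-- final overlap pass (objective: faster, asymptotic).

-- difference p2 - p1 of two points (the candidate shift)
def pvDiff (p1 p2 : Int × Int × Int) : Int × Int × Int :=
  (p2.1 - p1.1, p2.2.1 - p1.2.1, p2.2.2 - p1.2.2)

-- point shifted back by d: q - d
def pvShift (d q : Int × Int × Int) : Int × Int × Int :=
  (q.1 - d.1, q.2.1 - d.2.1, q.2.2 - d.2.2)

-- ===== PORT A =====
-- inner loop of A: for p2 in coords2 (remaining part `rest`), with fixed p1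
def findA_inner (coords1 coords2 : List (Int × Int × Int)) (n : Int) (p1 : Int × Int × Int) :
    List (Int × Int × Int) → Option ((Int × Int × Int) × (List (Int × Int × Int)))
  | [] => none
  | p2 :: rest =>
      let d := pvDiff p1 p2
      let shifted := coords2.map (fun q => pvShift d q)
      let overlapping := shifted.filter (fun q => coords1.contains q)
      if n ≤ (overlapping.length : Int) then some (d, overlapping)
      else findA_inner coords1 coords2 n p1 rest

-- outer loop of A: for p1 in coords1 (remaining part)
def findA_outer (coords1 coords2 : List (Int × Int × Int)) (n : Int) :
    List (Int × Int × Int) → Option ((Int × Int × Int) × (List (Int × Int × Int)))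
  | [] => none
  | p1 :: rest =>
      match findA_inner coords1 coords2 n p1 coords2 with
      | some r => some r
      | none => findA_outer coords1 coords2 n rest

def find_shift (coords1 : List (Int × Int × Int)) (coords2 : List (Int × Int × Int)) (n_for_success : Int) : Option ((Int × Int × Int) × (List (Int × Int × Int))) :=
  findA_outer coords1 coords2 n_for_success coords1

-- ===== PORT B =====
def find_shift_alt (coords1 : List (Int × Int × Int)) (coords2 : List (Int × Int × Int)) (n_for_success : Int) : Option ((Int × Int × Int) × (List (Int × Int × Int))) :=
  let s1 := PySem.Set.ofList coords1
  let votes := PySem.Dict.counter (coords2.flatMap (fun p2 => s1.map (fun p1 => pvDiff p1 p2)))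
  -- next(... for (p1, p2) in product(coords1, coords2) if votes[d] >= n, None)
  match (coords1.flatMap (fun p1 => coords2.map (fun p2 => pvDiff p1 p2))).find?
      (fun d => decide (n_for_success ≤ votes.getD d 0)) with
  | none => none
  | some d =>
      -- conditional comprehension: keep q - d when it lies in s1
      some (d, coords2.filterMap (fun q =>
        let p := pvShift d q
        if s1.contains p then some p else none))

-- ===== PRECONDITION & SPEC =====
def Spec_find_shift (coords1 : List (Int × Int × Int)) (coords2 : List (Int × Int × Int)) (n_for_success : Int) (out : Option ((Int × Int × Int) × (List (Int × Int × Int)))) : Prop := out = find_shift_alt coords1 coords2 n_for_success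
instance (coords1 : List (Int × Int × Int)) (coords2 : List (Int × Int × Int)) (n_for_success : Int) (out : Option ((Int × Int × Int) × (List (Int × Int × Int)))) : Decidable (Spec_find_shift coords1 coords2 n_for_success out) := by unfold Spec_find_shift; infer_instance

-- ===== CLAIM (what is proved, stated in full; the proofs are below) =====
def Claim_equal_find_shift : Prop := ∀ (coords1 : List (Int × Int × Int)) (coords2 : List (Int × Int × Int)) (n_for_success : Int), Dom_find_shift coords1 coords2 n_for_success → Spec_find_shift coords1 coords2 n_for_success (find_shift coords1 coords2 n_for_success)

-- ===== LEMMAS AND PROOFS =====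

-- A's overlap list for shift d
def pvOverlapA (coords1 coords2 : List (Int × Int × Int)) (d : Int × Int × Int) : List (Int × Int × Int) :=
  (coords2.map (fun q => pvShift d q)).filter (fun q => coords1.contains q)

-- pvDiff p1 p2 = d exactly when p1 is the shifted-back point p2 - d
theorem pvDiff_eq_iff (p1 p2 d : Int × Int × Int) : pvDiff p1 p2 = d ↔ p1 = pvShift d p2 := by
  cases p1 with | mk a bc => cases bc with | mk b c =>
  cases p2 with | mk a' bc' => cases bc' with | mk b' c' =>
  cases d with | mk da dbc => cases dbc with | mk db dc =>
  simp [pvDiff, pvShift, Prod.ext_iff]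
  omega

-- counting a value d among the diffs p2 - p1 (p1 ranging over the dedup of coords1)
-- equals the length of A's overlap list for d
theorem count_diffs (coords1 coords2 : List (Int × Int × Int)) (d : Int × Int × Int) :
    (coords2.flatMap (fun p2 => (PySem.Set.ofList coords1).map (fun p1 => pvDiff p1 p2))).count d
      = (pvOverlapA coords1 coords2 d).length := by
  induction coords2 with
  | nil => simp [pvOverlapA]
  | cons p2 rest ih =>
      have hinj : Function.Injective (fun p1 => pvDiff p1 p2) := by
        intro a b h
        have h' : pvDiff a p2 = pvDiff b p2 := h
        have ha : a = pvShift (pvDiff b p2) p2 := (pvDiff_eq_iff a p2 _).mp h'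
        have hb : b = pvShift (pvDiff b p2) p2 := (pvDiff_eq_iff b p2 _).mp rfl
        exact ha.trans hb.symm
      have hnd : (PySem.Set.ofList coords1).Nodup := PySem.Set.nodup_ofList coords1
      have hmem : pvShift d p2 ∈ PySem.Set.ofList coords1 ↔ pvShift d p2 ∈ coords1 :=
        PySem.Set.mem_ofList _ _
      have hhead : ((PySem.Set.ofList coords1).map (fun p1 => pvDiff p1 p2)).count d
          = if pvShift d p2 ∈ coords1 then 1 else 0 := by
        by_cases h : pvShift d p2 ∈ coords1
        · have hm : pvShift d p2 ∈ PySem.Set.ofList coords1 := hmem.mpr h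
          have hd : pvDiff (pvShift d p2) p2 = d := (pvDiff_eq_iff _ p2 d).mpr rfl
          rw [if_pos h, ← hd, List.count_map_of_injective _ _ hinj]
          exact List.count_eq_one_of_mem hnd hm
        · rw [if_neg h]
          apply List.count_eq_zero_of_not_mem
          intro hc
          rcases List.mem_map.mp hc with ⟨p1, hp1, hpd⟩
          have : p1 = pvShift d p2 := (pvDiff_eq_iff p1 p2 d).mp hpd
          subst this
          exact h (hmem.mp hp1)
      simp only [List.flatMap_cons, List.count_append, List.map_cons, pvOverlapA,
        List.filter_cons, hhead, ih]
      by_cases h : pvShift d p2 ∈ coords1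
      · simp [h]
        omega
      · simp [h]

-- B's votes lookup at d is exactly the length of A's overlap list for d
theorem votes_getD (coords1 coords2 : List (Int × Int × Int)) (d : Int × Int × Int) :
    (PySem.Dict.counter (coords2.flatMap (fun p2 => (PySem.Set.ofList coords1).map (fun p1 => pvDiff p1 p2)))).getD d 0
      = ((pvOverlapA coords1 coords2 d).length : Int) := by
  rw [PySem.Dict.getD_counter]
  exact_mod_cast count_diffs coords1 coords2 d

-- B's conditional comprehension equals A's filter-of-map overlap list
theorem overlap_eq (coords1 coords2 : List (Int × Int × Int)) (d : Int × Int × Int) :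
    (coords2.filterMap (fun q =>
        let p := pvShift d q
        if List.contains (PySem.Set.ofList coords1) p then some p else none))
      = pvOverlapA coords1 coords2 d := by
  induction coords2 with
  | nil => rfl
  | cons q rest ih =>
      simp only [pvOverlapA, List.filterMap_cons, List.map_cons, List.filter_cons] at ih ⊢
      by_cases h : pvShift d q ∈ coords1
      · rw [ih]
        simp [PySem.Set.mem_ofList, h]
      · rw [ih]
        simp [PySem.Set.mem_ofList, h]

-- A's inner loop equals find? over the diffs of the remaining coords2, packaged with the overlap
theorem inner_eq_find (coords1 coords2 : List (Int × Int × Int)) (n : Int) (p1 : Int × Int × Int)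
    (rest : List (Int × Int × Int)) :
    findA_inner coords1 coords2 n p1 rest
      = match (rest.map (fun p2 => pvDiff p1 p2)).find?
            (fun d => decide (n ≤ ((pvOverlapA coords1 coords2 d).length : Int))) with
        | none => none
        | some d => some (d, pvOverlapA coords1 coords2 d) := by
  induction rest with
  | nil => rfl
  | cons p2 rest ih =>
      have hA : findA_inner coords1 coords2 n p1 (p2 :: rest)
          = if n ≤ ((pvOverlapA coords1 coords2 (pvDiff p1 p2)).length : Int)
            then some (pvDiff p1 p2, pvOverlapA coords1 coords2 (pvDiff p1 p2))
            else findA_inner coords1 coords2 n p1 rest := rfl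
      rw [hA, List.map_cons, List.find?_cons]
      by_cases h : n ≤ ((pvOverlapA coords1 coords2 (pvDiff p1 p2)).length : Int)
      · rw [if_pos h, decide_eq_true h]
      · rw [if_neg h, ih, decide_eq_false h]

-- A's outer loop equals find? over the flat list of candidate diffs
theorem outer_eq_find (coords1 coords2 : List (Int × Int × Int)) (n : Int)
    (rest : List (Int × Int × Int)) :
    findA_outer coords1 coords2 n rest
      = match (rest.flatMap (fun p1 => coords2.map (fun p2 => pvDiff p1 p2))).find?
            (fun d => decide (n ≤ ((pvOverlapA coords1 coords2 d).length : Int))) with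
        | none => none
        | some d => some (d, pvOverlapA coords1 coords2 d) := by
  induction rest with
  | nil => rfl
  | cons p1 rest ih =>
      have hA : findA_outer coords1 coords2 n (p1 :: rest)
          = match findA_inner coords1 coords2 n p1 coords2 with
            | some r => some r
            | none => findA_outer coords1 coords2 n rest := rfl
      rw [hA, inner_eq_find, ih, List.flatMap_cons, List.find?_append]
      cases (coords2.map (fun p2 => pvDiff p1 p2)).find?
          (fun d => decide (n ≤ ((pvOverlapA coords1 coords2 d).length : Int))) with
      | none => rfl
      | some d => rfl

-- ===== VERDICT (by name: the statement is the Claim_ definition above) =====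
theorem find_shift_spec : Claim_equal_find_shift := by
  intro coords1 coords2 n _
  unfold Spec_find_shift find_shift find_shift_alt
  rw [outer_eq_find]
  have hp : (fun d => decide (n ≤ (PySem.Dict.counter (coords2.flatMap (fun p2 => (PySem.Set.ofList coords1).map (fun p1 => pvDiff p1 p2)))).getD d 0))
      = (fun d => decide (n ≤ ((pvOverlapA coords1 coords2 d).length : Int))) := by
    funext d; rw [votes_getD]
  simp only [hp]
  cases (coords1.flatMap (fun p1 => coords2.map (fun p2 => pvDiff p1 p2))).find?
      (fun d => decide (n ≤ ((pvOverlapA coords1 coords2 d).length : Int))) with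
  | none => rfl
  | some d => exact congrArg some (congrArg (Prod.mk d) (overlap_eq coords1 coords2 d).symm)
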